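-- pv_equiv track=rewrite | github.com/ManSoSec/Microsoft-Malware-Challenge | Source Code/feature_extraction.py | asm_APIs
-- ===== SOURCE A (Python) =====
-- def asm_APIs(asm_code, apis):
--     apis_values = [0]*len(apis)
--     for row in asm_code:
--         #parts = row.replace(',',' ').replace('+',' ').replace('*',' ').replace('[',' ').replace(']',' ') \
--         #            .replace('-',' ').split()
--         for i in range(len(apis)):
--             if apis[i] in row:
--                 apis_values[i] += 1 #parts.count(opcode)
--                 break
--     return apis_values
-- ===== SOURCE B (Python) =====
-- def asm_APIs(asm_code, apis):
--     counts = []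
--     remaining = list(asm_code)
--     for p in apis:
--         still = [r for r in remaining if p not in r]
--         counts.append(len(remaining) - len(still))
--         remaining = still
--     return counts
-- ===== Notes on version B (the rewrite author's own statement) =====
-- stated objective: alternative
-- what changed: A is row-major: for each row it scans the api list until the first substring match and bumps that counter in place; B is pattern-major: it processes apis in order against a shrinking set of rows, filtering out the rows each api matches and recording how many were removed, so no per-row index loop or break exists.
import Mathlib
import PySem

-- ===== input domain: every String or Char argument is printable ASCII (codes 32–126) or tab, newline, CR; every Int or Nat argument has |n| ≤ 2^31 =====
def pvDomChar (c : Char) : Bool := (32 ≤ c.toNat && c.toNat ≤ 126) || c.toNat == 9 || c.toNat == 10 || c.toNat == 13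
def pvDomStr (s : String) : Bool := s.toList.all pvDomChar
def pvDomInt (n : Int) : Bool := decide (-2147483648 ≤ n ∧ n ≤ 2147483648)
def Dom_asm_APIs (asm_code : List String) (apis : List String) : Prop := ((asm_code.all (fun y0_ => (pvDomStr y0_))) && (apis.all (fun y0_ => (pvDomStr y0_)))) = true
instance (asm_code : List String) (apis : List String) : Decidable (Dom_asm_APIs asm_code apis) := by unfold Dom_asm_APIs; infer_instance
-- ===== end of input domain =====

-- A is row-major (per row, scan apis to the first substring match, bump that counter, break);
-- B is pattern-major (per api, filter the matching rows out of a shrinking row set and record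
-- how many were removed). Same cost; a genuinely different traversal, no in-place counter array.

-- ===== PORT A =====
-- inner `for i in range(len(apis)): if apis[i] in row: vals[i] += 1; break`
def asmRowA (row : String) (apis : List String) (vals : List Int) (i : Nat) : List Int :=
  if _h : i < apis.length then
    if PySem.Str.isIn apis[i] row then vals.set i (vals.getD i 0 + 1)
    else asmRowA row apis vals (i + 1)
  else vals
termination_by apis.length - i

def asm_APIs (asm_code : List String) (apis : List String) : List Int :=
  asm_code.foldl (fun vals row => asmRowA row apis vals 0) (List.replicate apis.length 0)

-- ===== PORT B =====
-- `for p in apis: still = [r for r in remaining if p not in r]; counts.append(len(remaining)-len(still)); remaining = still`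
def asm_APIs_alt (asm_code : List String) (apis : List String) : List Int :=
  (apis.foldl
    (fun (st : List Int × List String) p =>
      let still := st.2.filter (fun r => !(PySem.Str.isIn p r))
      (st.1 ++ [((st.2.length : Int) - (still.length : Int))], still))
    (([] : List Int), asm_code)).1

-- ===== PRECONDITION & SPEC =====
def Spec_asm_APIs (asm_code : List String) (apis : List String) (out : List Int) : Prop := out = asm_APIs_alt asm_code apis
instance (asm_code : List String) (apis : List String) (out : List Int) : Decidable (Spec_asm_APIs asm_code apis out) := by unfold Spec_asm_APIs; infer_instance

-- ===== CLAIM (what is proved, stated in full; the proofs are below) =====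
def Claim_equal_asm_APIs : Prop := ∀ (asm_code : List String) (apis : List String), Dom_asm_APIs asm_code apis → Spec_asm_APIs asm_code apis (asm_APIs asm_code apis)

-- ===== LEMMAS AND PROOFS =====

-- the first-match index of a row in the api list (proof-side characterisation shared by both sides)
def firstMatch (row : String) (i : Nat) (apis : List String) : Option Nat :=
  match apis with
  | [] => none
  | p :: rest => if PySem.Str.isIn p row then some i else firstMatch row (i + 1) rest

theorem firstMatch_shift (row : String) : ∀ (apis : List String) (i : Nat),
    firstMatch row i apis = (firstMatch row 0 apis).map (fun j => j + i) := by
  intro apis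
  induction apis with
  | nil => intro i; simp [firstMatch]
  | cons p rest ih =>
    intro i
    simp only [firstMatch]
    split
    · simp
    · rw [ih (i + 1), ih 1]
      cases firstMatch row 0 rest <;> simp <;> omega

theorem firstMatch_lt (row : String) : ∀ (apis : List String) (i j : Nat),
    firstMatch row i apis = some j → i ≤ j ∧ j < i + apis.length := by
  intro apis
  induction apis with
  | nil => intro i j h; simp [firstMatch] at h
  | cons p rest ih =>
    intro i j h
    simp only [firstMatch] at h
    split at h
    · obtain rfl := Option.some.inj h
      refine ⟨Nat.le_refl i, ?_⟩; simp only [List.length_cons]; omega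
    · have := ih (i + 1) j h; simp only [List.length_cons] at *; omega

-- A's inner index loop equals "apply the first match"
theorem asmRowA_eq (row : String) (apis : List String) : ∀ (i : Nat) (vals : List Int),
    asmRowA row apis vals i =
      match firstMatch row i (apis.drop i) with
      | none => vals
      | some j => vals.set j (vals.getD j 0 + 1) := by
  intro i
  induction hfuel : apis.length - i using Nat.strong_induction_on generalizing i with
  | _ n ih =>
    intro vals
    unfold asmRowA
    by_cases h : i < apis.length
    · have hdrop : apis.drop i = apis[i] :: apis.drop (i + 1) := (List.getElem_cons_drop h).symm
      rw [hdrop]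
      simp only [h, dif_pos, firstMatch]
      split
      · rfl
      · exact ih (apis.length - (i + 1)) (by omega) (i + 1) rfl vals
    · have : apis.drop i = [] := List.drop_eq_nil_of_le (by omega)
      simp [h, this, firstMatch]

theorem set_getD (vals : List Int) (j k : Nat) (x : Int) :
    (vals.set j x).getD k 0 = if j = k ∧ j < vals.length then x else vals.getD k 0 := by
  by_cases hk : k < vals.length
  · rw [List.getD_eq_getElem _ _ (by simpa using hk), List.getD_eq_getElem _ _ hk,
        List.getElem_set]
    split_ifs with h1 h2 h2 <;> simp_all
  · have h1 : vals.length ≤ k := by omega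
    rw [List.getD_eq_default _ _ (by simpa using h1), List.getD_eq_default _ _ h1]
    split_ifs with h <;> omega

-- the fold of A over rows, read pointwise, is the starting value plus the first-match tally
theorem fold_count (apis : List String) : ∀ (rows : List String) (vals : List Int)
    (_hlen : vals.length = apis.length) (k : Nat) (_hk : k < apis.length),
    (rows.foldl (fun v row => asmRowA row apis v 0) vals).getD k 0 =
      vals.getD k 0 + (((rows.map (fun row => firstMatch row 0 apis)).count (some k) : Nat) : Int) := by
  intro rows
  induction rows with
  | nil => intro vals hlen k hk; simp
  | cons r rest ih =>
    intro vals hlen k hk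
    simp only [List.foldl_cons, List.map_cons, List.count_cons]
    rw [asmRowA_eq]
    rcases hfm : firstMatch r 0 (apis.drop 0) with _ | j
    · simp only [List.drop_zero] at hfm
      rw [ih vals hlen k hk, hfm]
      simp
    · simp only [List.drop_zero] at hfm
      have hj : j < apis.length := by
        have := firstMatch_lt r apis 0 j hfm; omega
      rw [ih _ (by simp [hlen]) k hk, hfm, set_getD]
      by_cases hjk : j = k
      · subst hjk; simp [hlen, hj]; omega
      · have : (some j == some k) = false := by simp [hjk]
        simp [hjk, this, hlen]

theorem asmRowA_length (row : String) (apis : List String) (vals : List Int) :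
    (asmRowA row apis vals 0).length = vals.length := by
  rw [asmRowA_eq]
  cases h : firstMatch row 0 (apis.drop 0) <;> simp

theorem fold_length (apis : List String) : ∀ (rows : List String) (vals : List Int),
    (rows.foldl (fun v row => asmRowA row apis v 0) vals).length = vals.length := by
  intro rows
  induction rows with
  | nil => intro vals; rfl
  | cons r rest ih => intro vals; simp only [List.foldl_cons]; rw [ih, asmRowA_length]

theorem asm_APIs_length (asm_code apis : List String) :
    (asm_APIs asm_code apis).length = apis.length := by
  unfold asm_APIs
  rw [fold_length]
  simp

-- boolean-equality facts about Option Nat used when splitting counts (all definitional)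
theorem beq_s00 : ((some 0 : Option Nat) == some 0) = true := rfl
theorem beq_sz (j : Nat) : ((some (j+1) : Option Nat) == some 0) = false := rfl
theorem beq_zs (i : Nat) : ((some 0 : Option Nat) == some (i+1)) = false := rfl
theorem beq_ss (j i : Nat) : ((some (j+1) : Option Nat) == some (i+1)) = ((some j : Option Nat) == some i) := by
  rw [Bool.eq_iff_iff]; simp
theorem beq_ns (i : Nat) : ((none : Option Nat) == some i) = false := rfl

-- B's pattern-major fold produces exactly the first-match tallies
theorem alt_fold (apis : List String) : ∀ (rem : List String) (acc : List Int),
    (apis.foldl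
      (fun (st : List Int × List String) p =>
        let still := st.2.filter (fun r => !(PySem.Str.isIn p r))
        (st.1 ++ [((st.2.length : Int) - (still.length : Int))], still))
      (acc, rem)).1 =
      acc ++ (List.range apis.length).map
        (fun i => (((rem.map (fun r => firstMatch r 0 apis)).count (some i) : Nat) : Int)) := by
  induction apis with
  | nil => intro rem acc; simp
  | cons p rest ih =>
    intro rem acc
    simp only [List.foldl_cons]
    rw [ih]
    have hsplit : ∀ r, firstMatch r 0 (p :: rest) =
        if PySem.Str.isIn p r then some 0 else (firstMatch r 0 rest).map (fun j => j + 1) := by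
      intro r
      simp only [firstMatch]
      split
      · rfl
      · exact firstMatch_shift r rest 1
    have hcount : ∀ (rs : List String),
        (((rs.map (fun r => firstMatch r 0 (p :: rest))).count (some 0) : Nat) : Int) =
          (rs.length : Int) - ((rs.filter (fun r => !(PySem.Str.isIn p r))).length : Int) := by
      intro rs
      induction rs with
      | nil => simp
      | cons r rs' ih2 =>
        simp only [List.map_cons, List.count_cons, List.filter_cons, hsplit r, List.length_cons]
        by_cases hp : PySem.Str.isIn p r
        · simp only [hp, if_true, Bool.not_true, Bool.false_eq_true, if_false, beq_s00]
          push_cast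
          omega
        · simp only [hp, Bool.not_false, eq_self_iff_true, if_true, Bool.false_eq_true, if_false,
            List.length_cons]
          cases hf : firstMatch r 0 rest with
          | none =>
            simp only [hf, Option.map_none, beq_ns, if_false, Bool.false_eq_true]
            push_cast
            omega
          | some j =>
            simp only [hf, Option.map_some, beq_sz, if_false, Bool.false_eq_true]
            push_cast
            omega
    have htail : ∀ (i : Nat) (rs : List String),
        ((rs.filter (fun r => !(PySem.Str.isIn p r))).map (fun r => firstMatch r 0 rest)).count (some i) =
          (rs.map (fun r => firstMatch r 0 (p :: rest))).count (some (i + 1)) := by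
      intro i rs
      induction rs with
      | nil => simp
      | cons r rs' ih2 =>
        simp only [List.map_cons, List.count_cons, List.filter_cons, hsplit r]
        by_cases hp : PySem.Str.isIn p r
        · simp only [hp, if_true, Bool.not_true, Bool.false_eq_true, if_false, beq_zs, ih2]
          omega
        · simp only [hp, Bool.not_false, eq_self_iff_true, if_true, Bool.false_eq_true, if_false,
            List.map_cons, List.count_cons, ih2]
          congr 1
          cases hf : firstMatch r 0 rest with
          | none => simp only [hf, Option.map_none, beq_ns, if_false, Bool.false_eq_true]
          | some j => simp only [hf, Option.map_some, beq_ss]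
    rw [List.append_assoc, List.length_cons, List.range_succ_eq_map, List.map_cons,
        List.map_map, List.singleton_append, hcount rem]
    congr 1
    congr 1
    apply List.map_congr_left
    intro i _
    simp only [Function.comp_apply, Nat.succ_eq_add_one]
    rw [htail i rem]

-- ===== VERDICT (by name: the statement is the Claim_ definition above) =====
theorem asm_APIs_spec : Claim_equal_asm_APIs := by
  intro asm_code apis _
  unfold Spec_asm_APIs asm_APIs_alt
  rw [alt_fold apis asm_code []]
  apply List.ext_getElem
  · rw [asm_APIs_length]; simp
  · intro k h1 h2
    have hk : k < apis.length := by rwa [asm_APIs_length] at h1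
    rw [← List.getD_eq_getElem (asm_APIs asm_code apis) 0 h1]
    unfold asm_APIs
    rw [fold_count apis asm_code _ (by simp) k hk]
    simp [hk]
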